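-- pv_equiv track=rewrite | github.com/parkjeongmi/jamie_study | 0626test/0619_1.py | solution
-- ===== SOURCE A (Python) =====
-- from collections import deque
-- import math
--
-- def solution(progresses, speeds):
--     todo = deque()
--     for i in range(len(progresses)) :
--         todo.append(math.ceil((100-progresses[i])/speeds[i]))
--     answer = []
--     while todo :
--         count = 1
--         now = todo.popleft()
--         while len(todo)>0 :
--             if todo[0] <= now :
--                 todo.popleft()
--                 count += 1
--             else : break
--         answer.append(count)
--     return answer
-- ===== SOURCE B (Python) =====
-- import math
--
-- def solution(progresses, speeds):
--     # Single linear pass: keep the current group leader's day in `front`;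
--     # a day that exceeds it starts a new group, otherwise it joins the last one.
--     answer = []
--     front = None
--     for p, s in zip(progresses, speeds):
--         d = math.ceil((100 - p) / s)
--         if front is None or d > front:
--             front = d
--             answer.append(1)
--         else:
--             answer[-1] += 1
--     return answer
-- ===== Notes on version B (the rewrite author's own statement) =====
-- stated objective: simpler
-- what changed: Replaced the deque plus nested popleft loops by one linear pass over the days that keeps the current group leader in a variable and either appends 1 or increments the last count.
import Mathlib
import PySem

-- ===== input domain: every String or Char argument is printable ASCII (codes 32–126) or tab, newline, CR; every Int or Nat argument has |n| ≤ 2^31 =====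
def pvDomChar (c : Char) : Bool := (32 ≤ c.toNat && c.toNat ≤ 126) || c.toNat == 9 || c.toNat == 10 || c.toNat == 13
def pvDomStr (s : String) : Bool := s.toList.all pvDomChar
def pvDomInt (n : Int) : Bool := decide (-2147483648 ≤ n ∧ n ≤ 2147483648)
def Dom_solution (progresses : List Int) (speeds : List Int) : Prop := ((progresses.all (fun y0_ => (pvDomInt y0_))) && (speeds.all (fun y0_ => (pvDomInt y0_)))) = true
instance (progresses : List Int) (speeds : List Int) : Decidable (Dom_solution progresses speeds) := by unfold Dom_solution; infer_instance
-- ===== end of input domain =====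

-- B replaces A's deque with nested popping loops by a single append-or-increment
-- pass tracking the current group leader (objective: simpler).

-- ===== PORT A =====
-- math.ceil((100-p)/s) as exact ceiling division -((-n)//s): on Dom (|ints| ≤ 2^31)
-- the float quotient never rounds across an integer, so float ceil = exact ceil.
def pvCeil (n s : Int) : Int := -(PySem.Int.floordiv (-n) s)

-- inner `while len(todo)>0: if todo[0] <= now: popleft; count += 1 else: break`
def pvInner (now : Int) : List Int → Int → Int × List Int
  | [], c => (c, [])
  | d :: t, c => if d ≤ now then pvInner now t (c + 1) else (c, d :: t)

lemma pvInner_len (now : Int) : ∀ (t : List Int) (c : Int), (pvInner now t c).2.length ≤ t.length := by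
  intro t
  induction t with
  | nil => intro c; simp [pvInner]
  | cons d t ih =>
    intro c
    by_cases h : d ≤ now
    · simp only [pvInner, if_pos h]
      exact le_trans (ih (c + 1)) (by simp)
    · simp [pvInner, if_neg h]

-- outer `while todo :` loop, accumulating `answer`
def pvGroup : List Int → List Int → List Int
  | [], ans => ans
  | now :: rest, ans =>
    let r := pvInner now rest 1
    pvGroup r.2 (ans ++ [r.1])
termination_by todo _ => todo.length
decreasing_by
  have h := pvInner_len now rest 1
  simp only [List.length_cons]
  omega

def solution (progresses : List Int) (speeds : List Int) : List Int :=
  -- `for i in range(len(progresses)): todo.append(ceil((100-progresses[i])/speeds[i]))`,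
  -- then the outer while loop over `todo` (indexing is in range and speeds[i] ≠ 0
  -- under Pre_, so pyGetD's default is never used)
  pvGroup ((PySem.List.pyRange 0 (progresses.length : Int) 1).foldl
    (fun td i => td ++ [pvCeil (100 - PySem.List.pyGetD progresses i 0) (PySem.List.pyGetD speeds i 0)]) []) []

-- ===== PORT B =====
-- `answer[-1] += 1`
def pvBumpLast : List Int → List Int
  | [] => []
  | [x] => [x + 1]
  | x :: y :: xs => x :: pvBumpLast (y :: xs)

-- loop body once the day `d` has been computed: append-or-increment against `front`
def pvStepD (st : Option Int × List Int) (d : Int) : Option Int × List Int :=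
  match st.1 with
  | none => (some d, st.2 ++ [1])
  | some f => if d > f then (some d, st.2 ++ [1]) else (some f, pvBumpLast st.2)

def pvStep (st : Option Int × List Int) (q : Int × Int) : Option Int × List Int :=
  pvStepD st (pvCeil (100 - q.1) q.2)

def solution_alt (progresses : List Int) (speeds : List Int) : List Int :=
  ((progresses.zip speeds).foldl pvStep (none, [])).2

-- ===== PRECONDITION & SPEC =====
-- Pre_ excludes exactly the inputs where Python A raises: an index past the end of
-- speeds (IndexError) or a zero speed among the used ones (ZeroDivisionError).
def Pre_solution (progresses : List Int) (speeds : List Int) : Prop :=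
  progresses.length ≤ speeds.length ∧ (0 : Int) ∉ speeds.take progresses.length
instance (progresses : List Int) (speeds : List Int) : Decidable (Pre_solution progresses speeds) := by unfold Pre_solution; infer_instance
def pvWitness_solution : List Int × List Int := ([93, 30, 55], [1, 30, 5])

def Spec_solution (progresses : List Int) (speeds : List Int) (out : List Int) : Prop := out = solution_alt progresses speeds
instance (progresses : List Int) (speeds : List Int) (out : List Int) : Decidable (Spec_solution progresses speeds out) := by unfold Spec_solution; infer_instance

-- ===== CLAIM (what is proved, stated in full; the proofs are below) =====
def Claim_equal_solution : Prop := ∀ (progresses : List Int) (speeds : List Int), Dom_solution progresses speeds → Pre_solution progresses speeds → Spec_solution progresses speeds (solution progresses speeds)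

-- ===== LEMMAS AND PROOFS =====

lemma pvBumpLast_append (ans : List Int) (c : Int) :
    pvBumpLast (ans ++ [c]) = ans ++ [c + 1] := by
  induction ans with
  | nil => simp [pvBumpLast]
  | cons a as ih =>
    cases as with
    | nil => simp [pvBumpLast]
    | cons b bs => simpa [pvBumpLast] using ih

-- core invariant: B's fold, started inside a group with leader `now` and running
-- count `c`, produces exactly what A's outer loop produces from here on
lemma pvFold_inv : ∀ (todo : List Int) (now : Int) (ans : List Int) (c : Int),
    (todo.foldl pvStepD (some now, ans ++ [c])).2
      = pvGroup (pvInner now todo c).2 (ans ++ [(pvInner now todo c).1]) := by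
  intro todo
  induction todo with
  | nil => intro now ans c; simp [pvInner, pvGroup]
  | cons d t ih =>
    intro now ans c
    by_cases h : d ≤ now
    · have hngt : ¬ d > now := by omega
      simp only [List.foldl_cons, pvStepD, if_neg hngt, pvBumpLast_append,
        pvInner, if_pos h]
      exact ih now ans (c + 1)
    · have hgt : d > now := by omega
      simp only [List.foldl_cons, pvStepD, if_pos hgt, pvInner, if_neg h]
      have := ih d (ans ++ [c]) 1
      rw [this]
      conv_rhs => rw [pvGroup]

lemma pvFold_eq_group : ∀ (todo : List Int),
    (todo.foldl pvStepD ((none : Option Int), ([] : List Int))).2 = pvGroup todo [] := by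
  intro todo
  cases todo with
  | nil => simp [pvGroup]
  | cons d t =>
    have h1 : pvStepD (none, []) d = (some d, [] ++ [1]) := by simp [pvStepD]
    rw [List.foldl_cons, h1, pvFold_inv t d [] 1]
    conv_rhs => rw [pvGroup]

-- A's day list equals B's (zip-based) day list when speeds is long enough
lemma pvDays_eq (ps ss : List Int) (h : ps.length ≤ ss.length) :
    (PySem.List.pyRange 0 (ps.length : Int) 1).map
        (fun i => pvCeil (100 - PySem.List.pyGetD ps i 0) (PySem.List.pyGetD ss i 0))
      = (ps.zip ss).map (fun q => pvCeil (100 - q.1) q.2) := by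
  apply List.ext_getElem
  · simp [PySem.List.length_pyRange_one]
    omega
  · intro k h1 h2
    have hk : k < ps.length := by
      simpa [PySem.List.length_pyRange_one] using h1
    have hks : k < ss.length := lt_of_lt_of_le hk h
    simp only [List.getElem_map, PySem.List.getElem_pyRange_one, List.getElem_zip]
    rw [zero_add]
    simp only [PySem.List.pyGetD_natCast]
    rw [List.getD_eq_getElem ps 0 hk, List.getD_eq_getElem ss 0 hks]

-- ===== VERDICT (by name: the statement is the Claim_ definition above) =====
theorem solution_spec : Claim_equal_solution := by
  intro ps ss _ hpre
  unfold Spec_solution solution solution_alt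
  rw [PySem.List.foldl_append_singleton_eq_map, List.nil_append]
  rw [pvDays_eq ps ss hpre.1]
  unfold pvStep
  rw [← List.foldl_map, pvFold_eq_group]
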